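-- pv_equiv track=rewrite | github.com/prakruthishekar/Competitive-Coding | OA/JP/3.py | has_repeating_digits
-- ===== SOURCE A (Python) =====
-- def has_repeating_digits(num):
--     # Convert the number to a string to easily check for repeating digits
--     num_str = str(num)
--     # Use a set to keep track of digits seen so far
--     seen_digits = set()
--
--     for digit in num_str:
--         if digit in seen_digits:
--             return True
--         seen_digits.add(digit)
--
--     return False
-- ===== SOURCE B (Python) =====
-- def has_repeating_digits(num):
--     s = sorted(str(num))
--     return any(a == b for a, b in zip(s, s[1:]))
-- ===== Notes on version B (the rewrite author's own statement) =====
-- stated objective: alternative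
-- what changed: Replaces the incremental seen-set scan with early return by sort-then-adjacent-compare: sort the characters of str(num) and report whether any two neighbours are equal (duplicates in a sorted list are always adjacent).
import Mathlib
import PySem

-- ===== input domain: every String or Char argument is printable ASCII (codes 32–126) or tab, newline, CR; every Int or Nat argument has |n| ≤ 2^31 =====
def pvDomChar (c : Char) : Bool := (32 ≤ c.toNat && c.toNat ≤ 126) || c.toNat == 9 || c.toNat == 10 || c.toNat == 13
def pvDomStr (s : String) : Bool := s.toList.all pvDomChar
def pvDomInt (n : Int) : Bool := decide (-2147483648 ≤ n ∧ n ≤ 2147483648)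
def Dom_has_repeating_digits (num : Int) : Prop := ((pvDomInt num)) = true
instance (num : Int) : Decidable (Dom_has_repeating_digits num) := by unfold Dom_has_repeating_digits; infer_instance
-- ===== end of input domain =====

-- B replaces A's incremental seen-set scan with sort-then-adjacent-compare
-- (duplicates in a sorted list are adjacent); alternative algorithm, same result.

-- ===== PORT A =====
-- the 'for digit in num_str' loop with its early 'return True'
def hrdLoop (chars : List Char) (seen : PySem.Set Char) : Bool :=
  match chars with
  | [] => false
  | digit :: rest =>
    if PySem.Set.contains seen digit then true
    else hrdLoop rest (PySem.Set.add seen digit)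

def has_repeating_digits (num : Int) : Bool :=
  hrdLoop (PySem.Int.toStr num).toList PySem.Set.empty

-- ===== PORT B =====
def has_repeating_digits_alt (num : Int) : Bool :=
  let s := PySem.List.sorted (PySem.Int.toStr num).toList (fun c => c) false
  (s.zip (PySem.List.slice s (some 1) none)).any (fun p => p.1 == p.2)

-- ===== PRECONDITION & SPEC =====
def Spec_has_repeating_digits (num : Int) (out : Bool) : Prop := out = has_repeating_digits_alt num
instance (num : Int) (out : Bool) : Decidable (Spec_has_repeating_digits num out) := by unfold Spec_has_repeating_digits; infer_instance

-- ===== CLAIM =====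
def Claim_equal_has_repeating_digits : Prop := ∀ (num : Int), Dom_has_repeating_digits num → Spec_has_repeating_digits num (has_repeating_digits num)

-- ===== LEMMAS AND PROOFS =====

-- A's loop returns true exactly when the seen-set together with the remaining chars has a duplicate
lemma hrdLoop_eq_not_nodup (chars : List Char) (seen : PySem.Set Char) (hnd : seen.Nodup) :
    hrdLoop chars seen = !decide ((seen ++ chars).Nodup) := by
  induction chars generalizing seen with
  | nil =>
    show false = !decide ((seen ++ []).Nodup)
    simp [hnd]
  | cons c rest ih =>
    rw [hrdLoop]
    by_cases hc : c ∈ seen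
    · rw [if_pos (by simpa [PySem.Set.contains_iff] using hc)]
      have : ¬ (seen ++ c :: rest).Nodup := by
        intro h
        have hdis := (List.nodup_append.mp h).2.2
        exact hdis c hc c (List.mem_cons_self ..) rfl
      simp [this]
    · rw [if_neg (by simpa [PySem.Set.contains_iff] using hc)]
      rw [ih (PySem.Set.add seen c) (PySem.Set.nodup_add seen c hnd)]
      rw [PySem.Set.add_of_not_mem hc]
      simp

-- In a ≤-sorted list, some adjacent pair is equal exactly when the list has a duplicate
lemma adj_eq_sorted (s : List Char) (hs : s.Pairwise (· ≤ ·)) :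
    (s.zip s.tail).any (fun p => p.1 == p.2) = !decide s.Nodup := by
  induction s with
  | nil => simp
  | cons a t ih =>
    match t, hs with
    | [], _ => simp
    | b :: u, hs =>
      have hab : a ≤ b := (List.pairwise_cons.mp hs).1 b (by simp)
      have htail : (b :: u).Pairwise (· ≤ ·) := (List.pairwise_cons.mp hs).2
      by_cases he : a = b
      · subst he
        simp [List.zip]
      · have hna : a ∉ b :: u := by
          intro hmem
          rcases List.mem_cons.mp hmem with h | h
          · exact he h
          · have hba : b ≤ a := (List.pairwise_cons.mp htail).1 a h
            exact he (le_antisymm hab hba)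
        have hndiff : (a :: b :: u).Nodup ↔ (b :: u).Nodup :=
          ⟨List.Nodup.of_cons, fun h => List.nodup_cons.mpr ⟨hna, h⟩⟩
        have h1 : (a == b) = false := by simp [he]
        calc ((a :: b :: u).zip (a :: b :: u).tail).any (fun p => p.1 == p.2)
            = ((b :: u).zip (b :: u).tail).any (fun p => p.1 == p.2) := by simp [h1]
          _ = !decide (b :: u).Nodup := ih htail
          _ = !decide (a :: b :: u).Nodup := by rw [decide_eq_decide.mpr hndiff]

theorem has_repeating_digits_spec : Claim_equal_has_repeating_digits := by
  intro num _
  have hperm : (PySem.List.sorted (PySem.Int.toStr num).toList (fun c => c) false).Perm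
      (PySem.Int.toStr num).toList := PySem.List.sorted_perm _ _ _
  have hpw : (PySem.List.sorted (PySem.Int.toStr num).toList (fun c => c) false).Pairwise (· ≤ ·) := by
    simpa using PySem.List.sorted_pairwise (xs := (PySem.Int.toStr num).toList) (key := fun c => c)
  unfold Spec_has_repeating_digits has_repeating_digits has_repeating_digits_alt
  show hrdLoop (PySem.Int.toStr num).toList PySem.Set.empty
      = ((PySem.List.sorted (PySem.Int.toStr num).toList (fun c => c) false).zip
          (PySem.List.slice (PySem.List.sorted (PySem.Int.toStr num).toList (fun c => c) false)
            (some 1) none)).any (fun p => p.1 == p.2)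
  rw [PySem.List.slice_from_one, adj_eq_sorted _ hpw,
      hrdLoop_eq_not_nodup _ PySem.Set.empty (by simp [PySem.Set.empty])]
  simp [PySem.Set.empty]
  simpa using hperm.nodup_iff.symm
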